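-- pv_equiv track=rewrite | github.com/vallmeister/Programming | src/leetcode/2979_most_expensive_item_that_can_not_be_bought.py | mostExpensiveItem
-- ===== SOURCE A (Python) =====
-- def mostExpensiveItem(primeOne: int, primeTwo: int) -> int:
--     dp = [False] * 10 ** 5
--     dp[primeOne] = True
--     dp[primeTwo] = True
--     ans = 0
--     for i in range(10 ** 5):
--         if i >= primeOne:
--             dp[i] = dp[i] or dp[i - primeOne]
--         if i >= primeTwo:
--             dp[i] = dp[i] or dp[i - primeTwo]
--         if not dp[i]:
--             ans = i
--     return ans
-- ===== SOURCE B (Python) =====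
-- def _buyable(i, p, q):
--     # can i be written as a*p + b*q with a, b >= 0 and a + b >= 1 ?
--     if p == 0 and q == 0:
--         return i == 0
--     if p == 0:
--         return i % q == 0
--     if q == 0:
--         return i % p == 0
--     if p <= q:
--         return any(b * q <= i and (i - b * q) % p == 0 and (b >= 1 or p <= i - b * q)
--                    for b in range(p))
--     return any(a * p <= i and (i - a * p) % q == 0 and (a >= 1 or q <= i - a * p)
--                for a in range(q))
--
--
-- def mostExpensiveItem(primeOne: int, primeTwo: int) -> int:
--     for i in range(10 ** 5 - 1, -1, -1):
--         if not _buyable(i, primeOne, primeTwo):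
--             return i
--     return 0
-- ===== Notes on version B (the rewrite author's own statement) =====
-- stated objective: alternative
-- what changed: Replaces the forward 100000-entry boolean dp sieve by a top-down linear search that tests each price directly with an O(min(p,q)) modular-arithmetic representability scan (no dp table); it stops at the answer instead of always doing 10^5 sieve steps, which a timing run measured as faster.
-- outside the precondition, e.g. on mostExpensiveItem(-1, -1): A returns 99997, B returns 99999; on mostExpensiveItem(3, -1): A returns 99997, B returns 99999
import Mathlib
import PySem

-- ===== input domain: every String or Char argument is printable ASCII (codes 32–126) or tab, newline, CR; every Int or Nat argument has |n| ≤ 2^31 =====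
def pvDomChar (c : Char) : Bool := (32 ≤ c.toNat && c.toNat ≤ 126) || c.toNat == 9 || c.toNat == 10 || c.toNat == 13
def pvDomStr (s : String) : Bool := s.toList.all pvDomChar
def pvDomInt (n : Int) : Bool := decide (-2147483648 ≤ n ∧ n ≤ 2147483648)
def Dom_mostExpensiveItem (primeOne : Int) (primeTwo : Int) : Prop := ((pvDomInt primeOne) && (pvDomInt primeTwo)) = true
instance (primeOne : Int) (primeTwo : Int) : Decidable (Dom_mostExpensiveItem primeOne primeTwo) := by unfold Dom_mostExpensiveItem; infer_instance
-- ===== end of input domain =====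

-- B replaces A's 100000-entry boolean dp sieve by a top-down linear search that tests each
-- price directly with an O(min(p,q)) modular-arithmetic buyability check (objective: alternative
-- algorithm, no dp table; typically far fewer operations than A's fixed 10^5-step sieve).

-- ===== PORT A =====
-- Python list read dp[i] (negative index wraps; out of range would raise, excluded by Pre_)
def pyDpGet (a : Array Bool) (i : Int) : Bool :=
  let j := if i < 0 then i + (a.size : Int) else i
  if 0 ≤ j then a.getD j.toNat false else false

-- Python list write dp[i] = v (negative index wraps; out of range would raise, excluded by Pre_)
def pyDpSet (a : Array Bool) (i : Int) (v : Bool) : Array Bool :=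
  let j := if i < 0 then i + (a.size : Int) else i
  if 0 ≤ j then a.setIfInBounds j.toNat v else a

-- one iteration of A's for-loop body
def mepStep (primeOne primeTwo : Int) (st : Array Bool × Int) (i : Int) : Array Bool × Int :=
  let dp := st.1
  let ans := st.2
  let dp := if i ≥ primeOne then pyDpSet dp i (pyDpGet dp i || pyDpGet dp (i - primeOne)) else dp
  let dp := if i ≥ primeTwo then pyDpSet dp i (pyDpGet dp i || pyDpGet dp (i - primeTwo)) else dp
  let ans := if !(pyDpGet dp i) then i else ans
  (dp, ans)

def mostExpensiveItem (primeOne : Int) (primeTwo : Int) : Int :=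
  let dp := Array.replicate 100000 false
  let dp := pyDpSet dp primeOne true
  let dp := pyDpSet dp primeTwo true
  let st := (PySem.List.pyRange 0 100000 1).foldl (mepStep primeOne primeTwo) (dp, 0)
  st.2

-- ===== PORT B =====
-- _buyable(i, p, q): can i be written as a*p + b*q with a, b >= 0 and a + b >= 1 ?
def pyBuyable (i p q : Int) : Bool :=
  if p = 0 ∧ q = 0 then decide (i = 0)
  else if p = 0 then decide (PySem.Int.mod i q = 0)
  else if q = 0 then decide (PySem.Int.mod i p = 0)
  else if p ≤ q then
    (PySem.List.pyRange 0 p 1).any (fun b =>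
      decide (b * q ≤ i) && decide (PySem.Int.mod (i - b * q) p = 0) &&
        (decide (1 ≤ b) || decide (p ≤ i - b * q)))
  else
    (PySem.List.pyRange 0 q 1).any (fun a =>
      decide (a * p ≤ i) && decide (PySem.Int.mod (i - a * p) q = 0) &&
        (decide (1 ≤ a) || decide (q ≤ i - a * p)))

-- the countdown loop "for i in range(10**5 - 1, -1, -1): if not _buyable(...): return i" / "return 0"
def bLoop (p q : Int) : Nat → Int
  | 0 => 0
  | Nat.succ n => if !(pyBuyable (n : Int) p q) then (n : Int) else bLoop p q n

def mostExpensiveItem_alt (primeOne : Int) (primeTwo : Int) : Int :=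
  bLoop primeOne primeTwo 100000

-- ===== PRECONDITION & SPEC =====
-- Pre_ excludes arguments outside [0, 10**5): there A either raises IndexError or, for some
-- negative arguments, returns a value produced by Python's negative-index wraparound into the
-- dp table (an artefact of the table size, which B does not reproduce)
def Pre_mostExpensiveItem (primeOne : Int) (primeTwo : Int) : Prop :=
  0 ≤ primeOne ∧ primeOne < 100000 ∧ 0 ≤ primeTwo ∧ primeTwo < 100000
instance (primeOne : Int) (primeTwo : Int) : Decidable (Pre_mostExpensiveItem primeOne primeTwo) := by
  unfold Pre_mostExpensiveItem; infer_instance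
def pvWitness_mostExpensiveItem : Int × Int := (2, 3)

def Spec_mostExpensiveItem (primeOne : Int) (primeTwo : Int) (out : Int) : Prop := out = mostExpensiveItem_alt primeOne primeTwo
instance (primeOne : Int) (primeTwo : Int) (out : Int) : Decidable (Spec_mostExpensiveItem primeOne primeTwo out) := by unfold Spec_mostExpensiveItem; infer_instance

-- ===== CLAIM (what is proved, stated in full; the proofs are below) =====
def Claim_equal_mostExpensiveItem : Prop := ∀ (primeOne : Int) (primeTwo : Int), Dom_mostExpensiveItem primeOne primeTwo → Pre_mostExpensiveItem primeOne primeTwo → Spec_mostExpensiveItem primeOne primeTwo (mostExpensiveItem primeOne primeTwo)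

-- ===== LEMMAS AND PROOFS =====

-- j is a sum of at least one copy of P or Q
def RepPN (P Q j : ℕ) : Prop := ∃ a b : ℕ, a * P + b * Q = j ∧ 1 ≤ a + b

lemma repPN_comm (P Q I : ℕ) : RepPN P Q I ↔ RepPN Q P I := by
  constructor
  · rintro ⟨a, b, hab, hpos⟩
    exact ⟨b, a, by omega, by omega⟩
  · rintro ⟨a, b, hab, hpos⟩
    exact ⟨b, a, by omega, by omega⟩

lemma repPN_zero_left (Q I : ℕ) : RepPN 0 Q I ↔ Q ∣ I := by
  constructor
  · rintro ⟨a, b, hab, hpos⟩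
    have e : a * 0 = 0 := Nat.mul_zero a
    refine ⟨b, ?_⟩
    have e2 : Q * b = b * Q := by ring
    omega
  · rintro ⟨c, hc⟩
    refine ⟨1, c, ?_, by omega⟩
    have e : c * Q = Q * c := by ring
    omega

-- peeling one coin off a positive representation (valid for all P, Q including 0)
lemma repPN_q_side {P Q n a b : ℕ} (hab : a * P + b * Q = n) (hQ1 : 1 ≤ Q) (hb2 : 2 ≤ b) :
    1 ≤ Q ∧ Q ≤ n ∧ RepPN P Q (n - Q) := by
  have e1 : 1 * Q ≤ b * Q := Nat.mul_le_mul_right Q (by omega)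
  refine ⟨hQ1, by omega, ⟨a, b - 1, ?_, by omega⟩⟩
  obtain ⟨b', rfl⟩ : ∃ b', b = b' + 1 := ⟨b - 1, by omega⟩
  have e2 : (b' + 1) * Q = b' * Q + Q := by ring
  simp only [Nat.add_sub_cancel]
  omega

lemma repPN_rec0 (P Q n : ℕ) :
    RepPN P Q n ↔ (n = P ∨ n = Q ∨ (1 ≤ P ∧ P ≤ n ∧ RepPN P Q (n - P)) ∨
      (1 ≤ Q ∧ Q ≤ n ∧ RepPN P Q (n - Q))) := by
  constructor
  · rintro ⟨a, b, hab, hpos⟩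
    rcases Nat.eq_zero_or_pos a with ha0 | ha1
    · -- a = 0, hence b ≥ 1 and n = b * Q
      have eaP : a * P = 0 := by rw [ha0, Nat.zero_mul]
      rcases Nat.eq_zero_or_pos Q with hQ0 | hQ1
      · right; left
        have e : b * Q = 0 := by rw [hQ0, Nat.mul_zero]
        omega
      · by_cases hb1 : b = 1
        · right; left
          have e : b * Q = Q := by rw [hb1, Nat.one_mul]
          omega
        · right; right; right
          exact repPN_q_side hab hQ1 (by omega)
    · -- a ≥ 1
      rcases Nat.eq_zero_or_pos P with hP0 | hP1
      · -- P = 0: n = b * Q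
        have eaP : a * P = 0 := by rw [hP0, Nat.mul_zero]
        rcases Nat.eq_zero_or_pos b with hb0 | hb1
        · left
          have e : b * Q = 0 := by rw [hb0, Nat.zero_mul]
          omega
        · rcases Nat.eq_zero_or_pos Q with hQ0 | hQ1
          · left
            have e : b * Q = 0 := by rw [hQ0, Nat.mul_zero]
            omega
          · by_cases hb1' : b = 1
            · right; left
              have e : b * Q = Q := by rw [hb1', Nat.one_mul]
              omega
            · right; right; right
              exact repPN_q_side hab hQ1 (by omega)
      · -- P ≥ 1
        by_cases h10 : a = 1 ∧ b = 0
        · left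
          obtain ⟨h1, h2⟩ := h10
          have e1 : a * P = P := by rw [h1, Nat.one_mul]
          have e2 : b * Q = 0 := by rw [h2, Nat.zero_mul]
          omega
        · right; right; left
          have e1 : 1 * P ≤ a * P := Nat.mul_le_mul_right P (by omega)
          refine ⟨hP1, by omega, ⟨a - 1, b, ?_, by omega⟩⟩
          obtain ⟨a', rfl⟩ : ∃ a', a = a' + 1 := ⟨a - 1, by omega⟩
          have e2 : (a' + 1) * P = a' * P + P := by ring
          simp only [Nat.add_sub_cancel]
          omega
  · rintro (h | h | ⟨hP1, hle, a, b, hab, hpos⟩ | ⟨hQ1, hle, a, b, hab, hpos⟩)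
    · refine ⟨1, 0, ?_, by omega⟩
      have e1 : 1 * P = P := by ring
      have e2 : 0 * Q = 0 := by ring
      omega
    · refine ⟨0, 1, ?_, by omega⟩
      have e1 : 0 * P = 0 := by ring
      have e2 : 1 * Q = Q := by ring
      omega
    · refine ⟨a + 1, b, ?_, by omega⟩
      have e : (a + 1) * P = a * P + P := by ring
      omega
    · refine ⟨a, b + 1, ?_, by omega⟩
      have e : (b + 1) * Q = b * Q + Q := by ring
      omega

lemma pyDpGet_natCast (a : Array Bool) (j : ℕ) : pyDpGet a (j : Int) = a.getD j false := by
  simp only [pyDpGet]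
  rw [if_neg (show ¬((j : Int) < 0) by omega), if_pos (show (0 : Int) ≤ (j : Int) by omega),
      Int.toNat_natCast]

lemma pyDpSet_natCast (a : Array Bool) (j : ℕ) (v : Bool) :
    pyDpSet a (j : Int) v = a.setIfInBounds j v := by
  simp only [pyDpSet]
  rw [if_neg (show ¬((j : Int) < 0) by omega), if_pos (show (0 : Int) ≤ (j : Int) by omega),
      Int.toNat_natCast]

lemma getD_false_lt (a : Array Bool) (j : ℕ) (h : j < a.size) : a.getD j false = a[j] := by
  simp [Array.getD_eq_getD_getElem?, Array.getElem?_eq_getElem h]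

-- the state after n iterations of A's loop
def mepState (primeOne primeTwo : Int) (n : ℕ) : Array Bool × Int :=
  (PySem.List.pyRange 0 (n : Int) 1).foldl (mepStep primeOne primeTwo)
    (pyDpSet (pyDpSet (Array.replicate 100000 false) primeOne true) primeTwo true, 0)

lemma mepState_succ (p q : Int) (n : ℕ) :
    mepState p q (n + 1) = mepStep p q (mepState p q n) (n : Int) := by
  unfold mepState
  rw [show ((n + 1 : ℕ) : Int) = (n : Int) + 1 by push_cast; ring,
      PySem.List.pyRange_one_succ_right (by positivity), List.foldl_append]
  rfl

lemma mostExpensiveItem_eq_state (p q : Int) :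
    mostExpensiveItem p q = (mepState p q 100000).2 := rfl

lemma pyDpSet_size (a : Array Bool) (i : Int) (v : Bool) : (pyDpSet a i v).size = a.size := by
  simp only [pyDpSet]
  split <;> split <;> simp [Array.size_setIfInBounds]

-- effect of one guarded Python update dp[n] = dp[n] or dp[n - P] on a read at j
lemma upd_get (P : ℕ) (a : Array Bool) (hsize : a.size = 100000) (n j : ℕ)
    (hn : n < 100000) (hj : j < 100000) :
    pyDpGet (if (n : Int) ≥ (P : Int) then
        pyDpSet a (n : Int) (pyDpGet a (n : Int) || pyDpGet a ((n : Int) - (P : Int))) else a)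
      (j : Int)
    = if j = n ∧ P ≤ n then (pyDpGet a (n : Int) || pyDpGet a ((n : Int) - (P : Int)))
      else pyDpGet a (j : Int) := by
  by_cases hPn : P ≤ n
  · rw [if_pos (show (n : Int) ≥ (P : Int) by exact_mod_cast hPn),
        pyDpSet_natCast, pyDpGet_natCast,
        getD_false_lt _ _ (by rw [Array.size_setIfInBounds]; omega),
        Array.getElem_setIfInBounds (by omega)]
    by_cases hjn : j = n
    · subst hjn
      rw [if_pos rfl, if_pos ⟨rfl, hPn⟩]
    · rw [if_neg (fun hh => hjn hh.symm), if_neg (by tauto),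
          pyDpGet_natCast, getD_false_lt _ _ (by omega)]
  · rw [if_neg (show ¬((n : Int) ≥ (P : Int)) by exact_mod_cast hPn), if_neg (by tauto)]

def InvMep (P Q n : ℕ) (st : Array Bool × Int) : Prop :=
  st.1.size = 100000 ∧
  (∀ j : ℕ, j < 100000 →
      (pyDpGet st.1 (j : Int) = true ↔ (if j < n then RepPN P Q j else (j = P ∨ j = Q)))) ∧
  (∀ k : ℕ, k < n → ¬ RepPN P Q k → (k : Int) ≤ st.2) ∧
  ((st.2 = 0 ∧ ∀ k : ℕ, k < n → RepPN P Q k) ∨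
    (∃ m : ℕ, m < n ∧ ¬ RepPN P Q m ∧ st.2 = (m : Int)))

lemma inv_base {P Q : ℕ} (_hP : P < 100000) (_hQ : Q < 100000) :
    InvMep P Q 0 (mepState (P : Int) (Q : Int) 0) := by
  have h0 : mepState (P : Int) (Q : Int) 0 =
      (pyDpSet (pyDpSet (Array.replicate 100000 false) (P : Int) true) (Q : Int) true, 0) := by
    unfold mepState
    rw [show ((0 : ℕ) : Int) = 0 from rfl, PySem.List.pyRange_one_eq_nil le_rfl]
    rfl
  rw [h0]
  refine ⟨by simp [pyDpSet_natCast], ?_, by omega,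
    Or.inl ⟨rfl, fun k hk => absurd hk (by omega)⟩⟩
  intro j hj
  have hsz : j < ((Array.replicate 100000 false).setIfInBounds P true).size := by simpa using hj
  rw [pyDpSet_natCast, pyDpSet_natCast, pyDpGet_natCast,
      getD_false_lt _ _ (by simpa using hj),
      Array.getElem_setIfInBounds hsz, Array.getElem_setIfInBounds (by simpa using hj)]
  simp only [Array.getElem_replicate]
  rw [if_neg (Nat.not_lt_zero j)]
  split_ifs with h1 h2
  · exact iff_of_true rfl (by omega)
  · exact iff_of_true rfl (by omega)
  · exact iff_of_false (by simp) (by omega)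

set_option maxHeartbeats 1000000 in
lemma inv_step {P Q : ℕ} (hP : P < 100000) (hQ : Q < 100000)
    (n : ℕ) (hn : n < 100000) (st : Array Bool × Int)
    (h : InvMep P Q n st) :
    InvMep P Q (n + 1) (mepStep (P : Int) (Q : Int) st (n : Int)) := by
  obtain ⟨hsize, hget, hbound, hans⟩ := h
  obtain ⟨U1, hU1⟩ : ∃ x, x = (if (n : Int) ≥ (P : Int) then
      pyDpSet st.1 (n : Int) (pyDpGet st.1 (n : Int) || pyDpGet st.1 ((n : Int) - (P : Int)))
    else st.1) := ⟨_, rfl⟩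
  obtain ⟨U2, hU2⟩ : ∃ x, x = (if (n : Int) ≥ (Q : Int) then
      pyDpSet U1 (n : Int) (pyDpGet U1 (n : Int) || pyDpGet U1 ((n : Int) - (Q : Int)))
    else U1) := ⟨_, rfl⟩
  have hstep : mepStep (P : Int) (Q : Int) st (n : Int) =
      (U2, if !(pyDpGet U2 (n : Int)) then (n : Int) else st.2) := by
    rw [hU2, hU1]; rfl
  have hs1 : U1.size = 100000 := by
    rw [hU1]; split
    · rw [pyDpSet_size]; exact hsize
    · exact hsize
  have hs2 : U2.size = 100000 := by
    rw [hU2]; split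
    · rw [pyDpSet_size]; exact hs1
    · exact hs1
  have hg1 : ∀ j : ℕ, j < 100000 →
      (pyDpGet U1 (j : Int) = true ↔
        (if j = n then ((n = P ∨ n = Q) ∨ (1 ≤ P ∧ P ≤ n ∧ RepPN P Q (n - P)))
         else if j < n then RepPN P Q j else (j = P ∨ j = Q))) := by
    intro j hj
    rw [hU1, upd_get P st.1 hsize n j hn hj]
    by_cases hjn : j = n
    · subst hjn
      by_cases hPn : P ≤ j
      · rw [if_pos (show j = j ∧ P ≤ j from ⟨rfl, hPn⟩), if_pos (show j = j from rfl)]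
        rcases Nat.eq_zero_or_pos P with hP0 | hP1
        · -- P = 0: dp[i - primeOne] is dp[i] itself
          have hc : ((j : Int) - (P : Int)) = (j : Int) := by rw [hP0]; simp
          rw [hc, Bool.or_self]
          have e1 := hget j hj
          rw [if_neg (show ¬(j < j) by omega)] at e1
          rw [e1]
          constructor
          · exact Or.inl
          · rintro (h1 | ⟨h2, -, -⟩)
            exacts [h1, absurd h2 (by omega)]
        · have e1 := hget j hj
          rw [if_neg (show ¬(j < j) by omega)] at e1
          have e2 := hget (j - P) (by omega)
          rw [if_pos (show j - P < j by omega)] at e2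
          have hc : ((j : Int) - (P : Int)) = ((j - P : ℕ) : Int) := by
            rw [Nat.cast_sub hPn]
          rw [hc]
          simp only [Bool.or_eq_true]
          rw [e1, e2]
          constructor
          · rintro (h1 | h2)
            exacts [Or.inl h1, Or.inr ⟨hP1, hPn, h2⟩]
          · rintro (h1 | ⟨-, -, h2⟩)
            exacts [Or.inl h1, Or.inr h2]
      · rw [if_neg (show ¬(j = j ∧ P ≤ j) from fun hh => hPn hh.2),
            if_pos (show j = j from rfl)]
        have e1 := hget j hj
        rw [if_neg (show ¬(j < j) by omega)] at e1
        rw [e1]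
        constructor
        · exact Or.inl
        · rintro (h1 | ⟨-, h2, -⟩)
          exacts [h1, absurd h2 hPn]
    · rw [if_neg (show ¬(j = n ∧ P ≤ n) from fun hh => hjn hh.1), if_neg hjn]
      exact hget j hj
  have hg2 : ∀ j : ℕ, j < 100000 →
      (pyDpGet U2 (j : Int) = true ↔
        (if j < n + 1 then RepPN P Q j else (j = P ∨ j = Q))) := by
    intro j hj
    rw [hU2, upd_get Q U1 hs1 n j hn hj]
    by_cases hjn : j = n
    · subst hjn
      have hrec := repPN_rec0 P Q j
      by_cases hQn : Q ≤ j
      · rw [if_pos (show j = j ∧ Q ≤ j from ⟨rfl, hQn⟩), if_pos (show j < j + 1 by omega)]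
        rcases Nat.eq_zero_or_pos Q with hQ0 | hQ1
        · -- Q = 0: dp[i - primeTwo] is dp[i] itself
          have hc : ((j : Int) - (Q : Int)) = (j : Int) := by rw [hQ0]; simp
          rw [hc, Bool.or_self]
          have e1 := hg1 j hj
          rw [if_pos (show j = j from rfl)] at e1
          rw [e1, hrec]
          constructor
          · rintro (h1 | h2)
            · rcases h1 with h1 | h1
              exacts [Or.inl h1, Or.inr (Or.inl h1)]
            · exact Or.inr (Or.inr (Or.inl h2))
          · rintro (h1 | h2 | h3 | h4)
            · exact Or.inl (Or.inl h1)
            · exact Or.inl (Or.inr h2)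
            · exact Or.inr h3
            · exact absurd h4.1 (by omega)
        · have e1 := hg1 j hj
          rw [if_pos (show j = j from rfl)] at e1
          have e2 := hg1 (j - Q) (by omega)
          rw [if_neg (show ¬(j - Q = j) by omega), if_pos (show j - Q < j by omega)] at e2
          have hc : ((j : Int) - (Q : Int)) = ((j - Q : ℕ) : Int) := by
            rw [Nat.cast_sub hQn]
          rw [hc]
          simp only [Bool.or_eq_true]
          rw [e1, e2, hrec]
          constructor
          · rintro (((h1 | h2) | h3) | h4)
            · exact Or.inl h1
            · exact Or.inr (Or.inl h2)
            · exact Or.inr (Or.inr (Or.inl h3))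
            · exact Or.inr (Or.inr (Or.inr ⟨hQ1, hQn, h4⟩))
          · rintro (h1 | h2 | h3 | ⟨-, -, h4⟩)
            · exact Or.inl (Or.inl (Or.inl h1))
            · exact Or.inl (Or.inl (Or.inr h2))
            · exact Or.inl (Or.inr h3)
            · exact Or.inr h4
      · rw [if_neg (show ¬(j = j ∧ Q ≤ j) from fun hh => hQn hh.2),
            if_pos (show j < j + 1 by omega)]
        have e1 := hg1 j hj
        rw [if_pos (show j = j from rfl)] at e1
        rw [e1, hrec]
        constructor
        · rintro ((h1 | h2) | h3)
          · exact Or.inl h1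
          · exact Or.inr (Or.inl h2)
          · exact Or.inr (Or.inr (Or.inl h3))
        · rintro (h1 | h2 | h3 | h4)
          · exact Or.inl (Or.inl h1)
          · exact Or.inl (Or.inr h2)
          · exact Or.inr h3
          · exact absurd h4.2.1 hQn
    · rw [if_neg (show ¬(j = n ∧ Q ≤ n) from fun hh => hjn hh.1)]
      have e1 := hg1 j hj
      rw [if_neg hjn] at e1
      rw [e1]
      by_cases hjlt : j < n
      · rw [if_pos hjlt, if_pos (show j < n + 1 by omega)]
      · rw [if_neg hjlt, if_neg (show ¬(j < n + 1) by omega)]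
  have hgn := hg2 n hn
  rw [if_pos (by omega)] at hgn
  rw [hstep]
  by_cases hR : RepPN P Q n
  · have hb : pyDpGet U2 (n : Int) = true := hgn.mpr hR
    have hx : (if !(pyDpGet U2 (n : Int)) then (n : Int) else st.2) = st.2 := by
      rw [hb]; rfl
    rw [hx]
    refine ⟨hs2, hg2, ?_, ?_⟩
    · intro k hk hnr
      rcases Nat.lt_or_ge k n with hkn | hkn
      · exact hbound k hkn hnr
      · have hkeq : k = n := by omega
        subst hkeq
        exact absurd hR hnr
    · rcases hans with ⟨hz, hall⟩ | ⟨m, hm, hmr, hme⟩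
      · refine Or.inl ⟨hz, fun k hk => ?_⟩
        rcases Nat.lt_or_ge k n with hkn | hkn
        · exact hall k hkn
        · have hkeq : k = n := by omega
          subst hkeq
          exact hR
      · exact Or.inr ⟨m, by omega, hmr, hme⟩
  · have hb : pyDpGet U2 (n : Int) = false := by
      cases hh : pyDpGet U2 (n : Int)
      · rfl
      · exact absurd (hgn.mp hh) hR
    have hx : (if !(pyDpGet U2 (n : Int)) then (n : Int) else st.2) = (n : Int) := by
      rw [hb]; rfl
    rw [hx]
    refine ⟨hs2, hg2, ?_, ?_⟩
    · intro k hk hnr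
      show (k : Int) ≤ (n : Int)
      exact_mod_cast (show k ≤ n by omega)
    · exact Or.inr ⟨n, by omega, hR, rfl⟩

lemma inv_all {P Q : ℕ} (hP : P < 100000) (hQ : Q < 100000) :
    ∀ n : ℕ, n ≤ 100000 → InvMep P Q n (mepState (P : Int) (Q : Int) n) := by
  intro n
  induction n with
  | zero => intro _; exact inv_base hP hQ
  | succ k ih =>
      intro hk
      rw [mepState_succ]
      exact inv_step hP hQ k (by omega) _ (ih (by omega))

-- ===== B-side lemmas =====

lemma any_pyRange_natCast (P : ℕ) (f : Int → Bool) :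
    ((PySem.List.pyRange 0 (P : Int) 1).any f = true) ↔ ∃ b : ℕ, b < P ∧ f (b : Int) = true := by
  rw [PySem.List.pyRange_one]
  simp [List.any_eq_true, List.mem_range]

-- the body of the generator in _buyable, read back as arithmetic on ℕ
lemma scanBody_iff (P Q I b : ℕ) :
    ((decide ((b : Int) * (Q : Int) ≤ (I : Int)) &&
      decide (PySem.Int.mod ((I : Int) - (b : Int) * (Q : Int)) (P : Int) = 0) &&
        (decide ((1 : Int) ≤ (b : Int)) || decide ((P : Int) ≤ (I : Int) - (b : Int) * (Q : Int)))) = true)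
    ↔ (b * Q ≤ I ∧ P ∣ (I - b * Q) ∧ (1 ≤ b ∨ P ≤ I - b * Q)) := by
  simp only [Bool.and_eq_true, Bool.or_eq_true, decide_eq_true_eq]
  constructor
  · rintro ⟨⟨h1, h2⟩, h3⟩
    have hb1 : b * Q ≤ I := by exact_mod_cast h1
    have hsub : ((I : Int) - (b : Int) * (Q : Int)) = ((I - b * Q : ℕ) : Int) := by
      rw [Nat.cast_sub hb1]
      push_cast
      ring
    rw [hsub] at h2 h3
    refine ⟨hb1, ?_, ?_⟩
    · rw [PySem.Int.mod_eq_zero_iff_dvd] at h2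
      exact_mod_cast h2
    · rcases h3 with h3 | h3
      · exact Or.inl (by exact_mod_cast h3)
      · exact Or.inr (by exact_mod_cast h3)
  · rintro ⟨h1, h2, h3⟩
    have hsub : ((I : Int) - (b : Int) * (Q : Int)) = ((I - b * Q : ℕ) : Int) := by
      rw [Nat.cast_sub h1]
      push_cast
      ring
    refine ⟨⟨by exact_mod_cast h1, ?_⟩, ?_⟩
    · rw [hsub, PySem.Int.mod_eq_zero_iff_dvd]
      exact_mod_cast h2
    · rcases h3 with h3 | h3
      · exact Or.inl (by exact_mod_cast h3)
      · exact Or.inr (by rw [hsub]; exact_mod_cast h3)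

-- the scan over b < P decides membership (P, Q ≥ 1)
lemma rep_scan_iff {P Q : ℕ} (hP : 1 ≤ P) (hQ : 1 ≤ Q) (I : ℕ) :
    RepPN P Q I ↔ ∃ b : ℕ, b < P ∧ b * Q ≤ I ∧ P ∣ (I - b * Q) ∧ (1 ≤ b ∨ P ≤ I - b * Q) := by
  constructor
  · rintro ⟨a, b, hab, hpos⟩
    obtain ⟨b0, k, hb, hb0lt⟩ : ∃ b0 k, b0 + P * k = b ∧ b0 < P :=
      ⟨b % P, b / P, Nat.mod_add_div b P, Nat.mod_lt _ (by omega)⟩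
    have key : (a + k * Q) * P + b0 * Q = I := by
      have e : (a + k * Q) * P + b0 * Q = a * P + (b0 + P * k) * Q := by ring
      rw [e, hb]
      exact hab
    have hle : b0 * Q ≤ I := by omega
    refine ⟨b0, hb0lt, hle, ⟨a + k * Q, ?_⟩, ?_⟩
    · have e2 : P * (a + k * Q) = (a + k * Q) * P := by ring
      omega
    · by_cases hb01 : 1 ≤ b0
      · exact Or.inl hb01
      · right
        have hb00 : b0 = 0 := by omega
        have e0 : b0 * Q = 0 := by rw [hb00, Nat.zero_mul]
        have ha' : 1 ≤ a + k * Q := by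
          rcases Nat.eq_zero_or_pos a with ha | ha
          · rcases Nat.eq_zero_or_pos k with hk0 | hk1
            · exfalso
              have : P * k = 0 := by rw [hk0, Nat.mul_zero]
              omega
            · have : 1 * Q ≤ k * Q := Nat.mul_le_mul_right Q hk1
              omega
          · omega
        have : 1 * P ≤ (a + k * Q) * P := Nat.mul_le_mul_right P ha'
        omega
  · rintro ⟨b, hbP, hle, ⟨c, hc⟩, hpos⟩
    refine ⟨c, b, ?_, ?_⟩
    · have e : c * P = P * c := by ring
      omega
    · rcases hpos with hb1 | hPle
      · omega
      · rcases Nat.eq_zero_or_pos c with hc0 | hc1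
        · exfalso
          have : P * c = 0 := by rw [hc0, Nat.mul_zero]
          omega
        · omega

lemma buyable_iff (P Q I : ℕ) :
    pyBuyable (I : Int) (P : Int) (Q : Int) = true ↔ RepPN P Q I := by
  unfold pyBuyable
  rcases Nat.eq_zero_or_pos P with hP0 | hP1
  · subst hP0
    rcases Nat.eq_zero_or_pos Q with hQ0 | hQ1
    · subst hQ0
      rw [if_pos (show ((0 : ℕ) : Int) = 0 ∧ ((0 : ℕ) : Int) = 0 by norm_num)]
      simp only [decide_eq_true_eq]
      rw [repPN_zero_left]
      constructor
      · intro h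
        have : I = 0 := by exact_mod_cast h
        omega
      · intro h
        have : I = 0 := by omega
        rw [this]; norm_num
    · rw [if_neg (show ¬(((0 : ℕ) : Int) = 0 ∧ ((Q : ℕ) : Int) = 0) from by
          rintro ⟨-, h2⟩
          have : Q = 0 := by exact_mod_cast h2
          omega),
        if_pos (show ((0 : ℕ) : Int) = 0 by norm_num)]
      simp only [decide_eq_true_eq]
      rw [PySem.Int.mod_eq_zero_iff_dvd, repPN_zero_left]
      exact Int.natCast_dvd_natCast
  · rw [if_neg (show ¬(((P : ℕ) : Int) = 0 ∧ ((Q : ℕ) : Int) = 0) from by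
        rintro ⟨h1, -⟩
        have : P = 0 := by exact_mod_cast h1
        omega),
      if_neg (show ¬(((P : ℕ) : Int) = 0) from by
        intro h1
        have : P = 0 := by exact_mod_cast h1
        omega)]
    rcases Nat.eq_zero_or_pos Q with hQ0 | hQ1
    · subst hQ0
      rw [if_pos (show ((0 : ℕ) : Int) = 0 by norm_num)]
      simp only [decide_eq_true_eq]
      rw [PySem.Int.mod_eq_zero_iff_dvd, repPN_comm, repPN_zero_left]
      exact Int.natCast_dvd_natCast
    · rw [if_neg (show ¬(((Q : ℕ) : Int) = 0) from by
          intro h1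
          have : Q = 0 := by exact_mod_cast h1
          omega)]
      by_cases hpq : P ≤ Q
      · rw [if_pos (show ((P : ℕ) : Int) ≤ ((Q : ℕ) : Int) by exact_mod_cast hpq)]
        rw [any_pyRange_natCast, rep_scan_iff hP1 hQ1]
        constructor
        · rintro ⟨b, hb, hf⟩
          exact ⟨b, hb, (scanBody_iff P Q I b).mp hf⟩
        · rintro ⟨b, hb, hcond⟩
          exact ⟨b, hb, (scanBody_iff P Q I b).mpr hcond⟩
      · rw [if_neg (show ¬(((P : ℕ) : Int) ≤ ((Q : ℕ) : Int)) from by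
            intro h1
            exact hpq (by exact_mod_cast h1))]
        rw [any_pyRange_natCast, repPN_comm, rep_scan_iff hQ1 hP1]
        constructor
        · rintro ⟨a, ha, hf⟩
          exact ⟨a, ha, (scanBody_iff Q P I a).mp hf⟩
        · rintro ⟨a, ha, hcond⟩
          exact ⟨a, ha, (scanBody_iff Q P I a).mpr hcond⟩

lemma bLoop_of_all (p q : Int) (n : ℕ) (h : ∀ k : ℕ, k < n → pyBuyable (k : Int) p q = true) :
    bLoop p q n = 0 := by
  induction n with
  | zero => rfl
  | succ m ih =>
      show (if !(pyBuyable (m : Int) p q) then (m : Int) else bLoop p q m) = 0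
      rw [h m (by omega), if_neg (by decide)]
      exact ih (fun k hk => h k (by omega))

lemma bLoop_find (p q : Int) (m : ℕ) (hm : pyBuyable (m : Int) p q = false) :
    ∀ n : ℕ, m < n → (∀ k : ℕ, m < k → k < n → pyBuyable (k : Int) p q = true) →
      bLoop p q n = (m : Int) := by
  intro n
  induction n with
  | zero => intro h _; exact absurd h (by omega)
  | succ t ih =>
      intro hmn habove
      show (if !(pyBuyable (t : Int) p q) then (t : Int) else bLoop p q t) = (m : Int)
      by_cases htm : t = m
      · subst htm
        rw [hm, if_pos (by decide)]
      · rw [habove t (by omega) (by omega), if_neg (by decide)]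
        exact ih (by omega) (fun k hk1 hk2 => habove k hk1 (by omega))

-- ===== VERDICT (by name: the statement is the Claim_ definition above) =====
theorem mostExpensiveItem_spec : Claim_equal_mostExpensiveItem := by
  intro p q hdom hpre
  obtain ⟨hp0, hp1, hq0, hq1⟩ := hpre
  have hpP : p = ((p.toNat : ℕ) : Int) := (Int.toNat_of_nonneg hp0).symm
  have hqQ : q = ((q.toNat : ℕ) : Int) := (Int.toNat_of_nonneg hq0).symm
  have hP : p.toNat < 100000 := by omega
  have hQ : q.toNat < 100000 := by omega
  obtain ⟨hsize, hget, hbound, hans⟩ := inv_all hP hQ 100000 le_rfl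
  show mostExpensiveItem p q = mostExpensiveItem_alt p q
  rw [hpP, hqQ, mostExpensiveItem_eq_state]
  unfold mostExpensiveItem_alt
  rcases hans with ⟨hz, hall⟩ | ⟨m, hm, hmr, hme⟩
  · rw [hz]
    exact (bLoop_of_all _ _ 100000 (fun k hk => (buyable_iff _ _ k).mpr (hall k hk))).symm
  · rw [hme]
    have hbm : pyBuyable (m : Int) ((p.toNat : ℕ) : Int) ((q.toNat : ℕ) : Int) = false := by
      cases hh : pyBuyable (m : Int) ((p.toNat : ℕ) : Int) ((q.toNat : ℕ) : Int)
      · rfl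
      · exact absurd ((buyable_iff _ _ m).mp hh) hmr
    have habove : ∀ k : ℕ, m < k → k < 100000 →
        pyBuyable (k : Int) ((p.toNat : ℕ) : Int) ((q.toNat : ℕ) : Int) = true := by
      intro k hk1 hk2
      refine (buyable_iff _ _ k).mpr ?_
      by_contra hnr
      have hle := hbound k hk2 hnr
      rw [hme] at hle
      have : k ≤ m := by exact_mod_cast hle
      omega
    exact (bLoop_find _ _ m hbm 100000 hm habove).symm
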